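-- pv_equiv track=rewrite | github.com/encyc/vibe-trading | backend/src/vibe_trading/prime/constraints/behavioral.py | _extract_domain
-- ===== SOURCE A (Python) =====
-- from typing import Dict, List, Optional, Set
--
-- def _extract_domain(content: Dict) -> Optional[str]:
--     """从消息内容提取领域"""
--     # 根据content的内容判断领域
--     if "technical_indicators" in content:
--         return "technical_analysis"
--     elif "funding_rate" in content or "open_interest" in content:
--         return "fundamental_analysis"
--     elif any(key.startswith("news") for key in content.keys()):
--         return "news_analysis"
--     elif any("sentiment" in key for key in content.keys()):
--         return "sentiment_analysis"
--     elif "bull_argument" in content: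
--         return "bull_argument"
--     elif "bear_argument" in content:
--         return "bear_argument"
--     elif "trading_plan" in content:
--         return "trading_plan"
--     elif "final_decision" in content:
--         return "portfolio_decision"
--     # ... 更多领域判断
--     return None
-- ===== SOURCE B (Python) =====
-- from typing import Dict, List, Optional, Set
--
-- # B: invert the loops — instead of running each rule's scan over the keys in turn,
-- # classify every key ONCE into a priority rank (0 = highest-precedence rule it
-- # satisfies) and keep the minimum rank seen in a single pass; the label of the
-- # minimal rank is the answer.  Correct because each of A's rules is "some key has
-- # property i", so the first rule that fires is exactly the minimal rank over all
-- # (key, property) pairs.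
--
-- _LABELS = [
--     "technical_analysis",
--     "fundamental_analysis",
--     "news_analysis",
--     "sentiment_analysis",
--     "bull_argument",
--     "bear_argument",
--     "trading_plan",
--     "portfolio_decision",
-- ]
--
-- def _rank(key: str) -> int:
--     """Smallest rule index this single key satisfies (8 = none)."""
--     if key == "technical_indicators":
--         return 0
--     if key == "funding_rate" or key == "open_interest":
--         return 1
--     if key.startswith("news"):
--         return 2
--     if "sentiment" in key:
--         return 3
--     if key == "bull_argument":
--         return 4
--     if key == "bear_argument":
--         return 5
--     if key == "trading_plan":
--         return 6
--     if key == "final_decision":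
--         return 7
--     return 8
--
-- def _extract_domain(content: Dict) -> Optional[str]:
--     best = 8
--     for key in content:
--         r = _rank(key)
--         if r < best:
--             best = r
--     return _LABELS[best] if best < 8 else None
-- ===== Notes on version B (the rewrite author's own statement) =====
-- stated objective: alternative
-- what changed: Inverted the iteration: instead of A's up-to-eight staged scans of the keys (one existential scan per rule), B classifies each key once into the minimal rule rank it satisfies and keeps the minimum rank in a single pass, returning the label of the minimal rank.
import Mathlib
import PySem

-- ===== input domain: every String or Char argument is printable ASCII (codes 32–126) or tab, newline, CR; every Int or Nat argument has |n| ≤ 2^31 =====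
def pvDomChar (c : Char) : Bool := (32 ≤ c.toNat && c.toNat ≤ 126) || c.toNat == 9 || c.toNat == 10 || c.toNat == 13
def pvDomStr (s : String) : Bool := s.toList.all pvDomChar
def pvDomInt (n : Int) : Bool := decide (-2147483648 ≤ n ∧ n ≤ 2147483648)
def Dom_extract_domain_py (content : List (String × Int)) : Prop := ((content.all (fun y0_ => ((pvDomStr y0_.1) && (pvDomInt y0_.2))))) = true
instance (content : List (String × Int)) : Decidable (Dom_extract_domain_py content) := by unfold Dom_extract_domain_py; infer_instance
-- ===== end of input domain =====

-- B replaces A's staged per-rule scans of the keys by a single pass that classifies each key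
-- into its minimal matching rule rank and keeps the minimum (objective: alternative; same cost).

-- ===== PORT A =====
-- literal transliteration of A's if/elif cascade; 'k in content' = key membership, any(...) scans content.keys()
def extract_domain_py (content : List (String × Int)) : Option String :=
  let keys := content.map Prod.fst
  if keys.contains "technical_indicators" then some "technical_analysis"
  else if keys.contains "funding_rate" || keys.contains "open_interest" then some "fundamental_analysis"
  else if keys.any (fun key => PySem.Str.startswith key "news") then some "news_analysis"
  else if keys.any (fun key => PySem.Str.isIn "sentiment" key) then some "sentiment_analysis"
  else if keys.contains "bull_argument" then some "bull_argument"
  else if keys.contains "bear_argument" then some "bear_argument"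
  else if keys.contains "trading_plan" then some "trading_plan"
  else if keys.contains "final_decision" then some "portfolio_decision"
  else none

-- ===== PORT B =====
-- B inverts the iteration: each key is classified once into the minimal rule rank it
-- satisfies, and a single pass keeps the minimum rank; the label of that rank is returned.
def pvLabels : List String :=
  [ "technical_analysis", "fundamental_analysis", "news_analysis", "sentiment_analysis",
    "bull_argument", "bear_argument", "trading_plan", "portfolio_decision" ]

-- Source B's _rank: smallest rule index this single key satisfies (8 = none)
def pvRank (key : String) : Nat :=
  if key = "technical_indicators" then 0
  else if key = "funding_rate" ∨ key = "open_interest" then 1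
  else if PySem.Str.startswith key "news" then 2
  else if PySem.Str.isIn "sentiment" key then 3
  else if key = "bull_argument" then 4
  else if key = "bear_argument" then 5
  else if key = "trading_plan" then 6
  else if key = "final_decision" then 7
  else 8

-- Source B's loop: minimum rank over the keys, accumulator starting at 8
def extract_domain_py_alt (content : List (String × Int)) : Option String :=
  let best := content.foldl (fun b kv => min b (pvRank kv.1)) 8
  -- _LABELS[best] if best < 8 else None; the index is in range, so getD is exact
  if best < 8 then some (pvLabels.getD best "") else none

-- ===== PRECONDITION & SPEC =====
def Spec_extract_domain_py (content : List (String × Int)) (out : Option String) : Prop := out = extract_domain_py_alt content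
instance (content : List (String × Int)) (out : Option String) : Decidable (Spec_extract_domain_py content out) := by unfold Spec_extract_domain_py; infer_instance

-- ===== CLAIM (what is proved, stated in full; the proofs are below) =====
def Claim_equal_extract_domain_py : Prop := ∀ (content : List (String × Int)), Dom_extract_domain_py content → Spec_extract_domain_py content (extract_domain_py content)

-- ===== LEMMAS AND PROOFS =====

-- the fold never increases the accumulator
theorem pvFold_le_init (keys : List String) : ∀ b : Nat,
    keys.foldl (fun b k => min b (pvRank k)) b ≤ b := by
  induction keys with
  | nil => intro b; simp
  | cons k ks ih => intro b; exact le_trans (ih _) (min_le_left _ _)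

-- the fold is bounded by the rank of any member
theorem pvFold_le_rank (keys : List String) (k : String) (hk : k ∈ keys) : ∀ b : Nat,
    keys.foldl (fun b k => min b (pvRank k)) b ≤ pvRank k := by
  induction keys with
  | nil => cases hk
  | cons x xs ih =>
    intro b
    rcases List.mem_cons.1 hk with h | h
    · subst h
      simp only [List.foldl_cons]
      exact le_trans (pvFold_le_init xs (min b (pvRank k))) (min_le_right _ _)
    · exact ih h _

-- a lower bound on all ranks and on the accumulator is a lower bound on the fold
theorem pvLe_fold (i : Nat) (keys : List String) (h : ∀ k ∈ keys, i ≤ pvRank k) :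
    ∀ b : Nat, i ≤ b → i ≤ keys.foldl (fun b k => min b (pvRank k)) b := by
  induction keys with
  | nil => intro b hb; simpa
  | cons x xs ih =>
    intro b hb
    exact ih (fun k hk => h k (List.mem_cons_of_mem _ hk)) _
      (le_min hb (h x List.mem_cons_self))

-- ===== VERDICT (by name: the statement is the Claim_ definition above) =====
theorem extract_domain_py_spec : Claim_equal_extract_domain_py := by
  intro content _
  unfold Spec_extract_domain_py extract_domain_py extract_domain_py_alt
  have hfold : content.foldl (fun b kv => min b (pvRank kv.1)) 8
      = (content.map Prod.fst).foldl (fun b k => min b (pvRank k)) 8 := by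
    rw [List.foldl_map]
  rw [hfold]
  set keys := content.map Prod.fst with hkeys
  clear_value keys
  set m := keys.foldl (fun b k => min b (pvRank k)) 8 with hm
  by_cases h0 : "technical_indicators" ∈ keys
  · have hub : m ≤ 0 := le_trans (pvFold_le_rank _ _ h0 _) (by simp [pvRank])
    simp [h0, show m = 0 by omega, pvLabels]
  by_cases h1 : "funding_rate" ∈ keys ∨ "open_interest" ∈ keys
  · have hub : m ≤ 1 := by
      rcases h1 with hmem | hmem <;>
        exact le_trans (pvFold_le_rank _ _ hmem _) (by simp [pvRank])
    have hlb : 1 ≤ m := by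
      refine pvLe_fold _ _ ?_ _ (by omega)
      intro k hk
      have g0 : ¬ k = "technical_indicators" := by rintro rfl; exact h0 hk
      simp only [pvRank, if_neg g0]
      split_ifs <;> omega
    simp [h0, h1, show m = 1 by omega, pvLabels]
  by_cases h2 : ∃ x ∈ keys, PySem.Chars.startswith x.toList ['n','e','w','s'] = true
  · obtain ⟨k, hk, hks⟩ := h2
    have g0 : ¬ k = "technical_indicators" := by rintro rfl; exact h0 hk
    have g1 : ¬ (k = "funding_rate" ∨ k = "open_interest") := by
      rintro (rfl | rfl) <;> exact h1 (by simp [hk])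
    have hub : m ≤ 2 := by
      refine le_trans (pvFold_le_rank _ _ hk _) ?_
      simp [pvRank, g0, g1, PySem.Str.startswith, hks]
    have hlb : 2 ≤ m := by
      refine pvLe_fold _ _ ?_ _ (by omega)
      intro x hx
      have g0 : ¬ x = "technical_indicators" := by rintro rfl; exact h0 hx
      have g1 : ¬ (x = "funding_rate" ∨ x = "open_interest") := by
        rintro (rfl | rfl) <;> exact h1 (by simp [hx])
      simp only [pvRank, if_neg g0, if_neg g1]
      split_ifs <;> omega
    have h2' : ∃ x ∈ keys, PySem.Chars.startswith x.toList ['n','e','w','s'] = true := ⟨k, hk, hks⟩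
    simp [h0, h1, h2', show m = 2 by omega, pvLabels]
  by_cases h3 : ∃ x ∈ keys, PySem.Chars.isIn ['s','e','n','t','i','m','e','n','t'] x.toList = true
  · obtain ⟨k, hk, hks⟩ := h3
    have g0 : ¬ k = "technical_indicators" := by rintro rfl; exact h0 hk
    have g1 : ¬ (k = "funding_rate" ∨ k = "open_interest") := by
      rintro (rfl | rfl) <;> exact h1 (by simp [hk])
    have g2 : ¬ PySem.Str.startswith k "news" = true := by
      intro hs; exact h2 ⟨k, hk, by simpa using hs⟩
    have hub : m ≤ 3 := by
      refine le_trans (pvFold_le_rank _ _ hk _) ?_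
      simp [pvRank, g0, g1, g2, PySem.Str.isIn, hks]
      split_ifs <;> omega
    have hlb : 3 ≤ m := by
      refine pvLe_fold _ _ ?_ _ (by omega)
      intro x hx
      have g0 : ¬ x = "technical_indicators" := by rintro rfl; exact h0 hx
      have g1 : ¬ (x = "funding_rate" ∨ x = "open_interest") := by
        rintro (rfl | rfl) <;> exact h1 (by simp [hx])
      have g2 : ¬ PySem.Str.startswith x "news" = true := by
        intro hs; exact h2 ⟨x, hx, by simpa using hs⟩
      simp only [pvRank, if_neg g0, if_neg g1, if_neg g2]
      split_ifs <;> omega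
    have h3' : ∃ x ∈ keys, PySem.Chars.isIn ['s','e','n','t','i','m','e','n','t'] x.toList = true := ⟨k, hk, hks⟩
    simp [h0, h1, h2, h3', show m = 3 by omega, pvLabels]
  -- the remaining rules are single-key equality tests; shared low-rank negations
  have hlow : ∀ x ∈ keys, ¬ x = "technical_indicators" ∧
      ¬ (x = "funding_rate" ∨ x = "open_interest") ∧
      ¬ PySem.Str.startswith x "news" = true ∧
      ¬ PySem.Str.isIn "sentiment" x = true := by
    intro x hx
    refine ⟨?_, ?_, fun hs => h2 ⟨x, hx, by simpa using hs⟩, fun hs => h3 ⟨x, hx, by simpa using hs⟩⟩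
    · rintro rfl; exact h0 hx
    · rintro (rfl | rfl) <;> exact h1 (by simp [hx])
  by_cases h4 : "bull_argument" ∈ keys
  · obtain ⟨g0, g1, g2, g3⟩ := hlow _ h4
    have hub : m ≤ 4 := by
      exact le_trans (pvFold_le_rank _ _ h4 _) (by decide)
    have hlb : 4 ≤ m := by
      refine pvLe_fold _ _ ?_ _ (by omega)
      intro x hx
      obtain ⟨g0, g1, g2, g3⟩ := hlow _ hx
      simp only [pvRank, if_neg g0, if_neg g1, if_neg g2, if_neg g3]
      split_ifs <;> omega
    simp [h0, h1, h2, h3, h4, show m = 4 by omega, pvLabels]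
  by_cases h5 : "bear_argument" ∈ keys
  · obtain ⟨g0, g1, g2, g3⟩ := hlow _ h5
    have hub : m ≤ 5 := by
      exact le_trans (pvFold_le_rank _ _ h5 _) (by decide)
    have hlb : 5 ≤ m := by
      refine pvLe_fold _ _ ?_ _ (by omega)
      intro x hx
      obtain ⟨g0, g1, g2, g3⟩ := hlow _ hx
      have g4 : ¬ x = "bull_argument" := by rintro rfl; exact h4 hx
      simp only [pvRank, if_neg g0, if_neg g1, if_neg g2, if_neg g3, if_neg g4]
      split_ifs <;> omega
    simp [h0, h1, h2, h3, h4, h5, show m = 5 by omega, pvLabels]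
  by_cases h6 : "trading_plan" ∈ keys
  · obtain ⟨g0, g1, g2, g3⟩ := hlow _ h6
    have hub : m ≤ 6 := by
      exact le_trans (pvFold_le_rank _ _ h6 _) (by decide)
    have hlb : 6 ≤ m := by
      refine pvLe_fold _ _ ?_ _ (by omega)
      intro x hx
      obtain ⟨g0, g1, g2, g3⟩ := hlow _ hx
      have g4 : ¬ x = "bull_argument" := by rintro rfl; exact h4 hx
      have g5 : ¬ x = "bear_argument" := by rintro rfl; exact h5 hx
      simp only [pvRank, if_neg g0, if_neg g1, if_neg g2, if_neg g3, if_neg g4, if_neg g5]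
      split_ifs <;> omega
    simp [h0, h1, h2, h3, h4, h5, h6, show m = 6 by omega, pvLabels]
  by_cases h7 : "final_decision" ∈ keys
  · obtain ⟨g0, g1, g2, g3⟩ := hlow _ h7
    have hub : m ≤ 7 := by
      exact le_trans (pvFold_le_rank _ _ h7 _) (by decide)
    have hlb : 7 ≤ m := by
      refine pvLe_fold _ _ ?_ _ (by omega)
      intro x hx
      obtain ⟨g0, g1, g2, g3⟩ := hlow _ hx
      have g4 : ¬ x = "bull_argument" := by rintro rfl; exact h4 hx
      have g5 : ¬ x = "bear_argument" := by rintro rfl; exact h5 hx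
      have g6 : ¬ x = "trading_plan" := by rintro rfl; exact h6 hx
      simp only [pvRank, if_neg g0, if_neg g1, if_neg g2, if_neg g3, if_neg g4,
        if_neg g5, if_neg g6]
      split_ifs <;> omega
    simp [h0, h1, h2, h3, h4, h5, h6, h7, show m = 7 by omega, pvLabels]
  · have hlb : 8 ≤ m := by
      refine pvLe_fold _ _ ?_ _ (by omega)
      intro x hx
      obtain ⟨g0, g1, g2, g3⟩ := hlow _ hx
      have g4 : ¬ x = "bull_argument" := by rintro rfl; exact h4 hx
      have g5 : ¬ x = "bear_argument" := by rintro rfl; exact h5 hx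
      have g6 : ¬ x = "trading_plan" := by rintro rfl; exact h6 hx
      have g7 : ¬ x = "final_decision" := by rintro rfl; exact h7 hx
      simp only [pvRank, if_neg g0, if_neg g1, if_neg g2, if_neg g3, if_neg g4,
        if_neg g5, if_neg g6, if_neg g7]
      omega
    simp [h0, h1, h2, h3, h4, h5, h6, h7, show ¬ m < 8 by omega]
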